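-- pv_equiv track=rewrite | github.com/grimmweeper/aoc-2023 | day8/day8-2.py | traverseNetwork
-- ===== SOURCE A (Python) =====
-- def traverseNetwork(instructions, networkDict, current, step):
--     for direction in instructions:
--         if current.endswith('Z'):
--             return step
--         if direction == 'L':
--             current = networkDict[current][0]
--         elif direction == 'R':
--             current = networkDict[current][1]
--         step += 1
--     return traverseNetwork(instructions, networkDict, current, step)
-- ===== SOURCE B (Python) =====
-- def traverseNetwork(instructions, networkDict, current, step):
--     n = len(instructions)
--     j = 0
--     while True:
--         if current.endswith('Z'):
--             return step
--         direction = instructions[j % n]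
--         if direction == 'L':
--             current = networkDict[current][0]
--         elif direction == 'R':
--             current = networkDict[current][1]
--         step += 1
--         j += 1
-- ===== Notes on version B (the rewrite author's own statement) =====
-- stated objective: idiomatic
-- what changed: The tail recursion that restarts the instruction string after every full pass is flattened into one loop that cycles through the instructions with an index j and instructions[j % n], returning step as soon as the node ends in 'Z'.
import Mathlib
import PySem

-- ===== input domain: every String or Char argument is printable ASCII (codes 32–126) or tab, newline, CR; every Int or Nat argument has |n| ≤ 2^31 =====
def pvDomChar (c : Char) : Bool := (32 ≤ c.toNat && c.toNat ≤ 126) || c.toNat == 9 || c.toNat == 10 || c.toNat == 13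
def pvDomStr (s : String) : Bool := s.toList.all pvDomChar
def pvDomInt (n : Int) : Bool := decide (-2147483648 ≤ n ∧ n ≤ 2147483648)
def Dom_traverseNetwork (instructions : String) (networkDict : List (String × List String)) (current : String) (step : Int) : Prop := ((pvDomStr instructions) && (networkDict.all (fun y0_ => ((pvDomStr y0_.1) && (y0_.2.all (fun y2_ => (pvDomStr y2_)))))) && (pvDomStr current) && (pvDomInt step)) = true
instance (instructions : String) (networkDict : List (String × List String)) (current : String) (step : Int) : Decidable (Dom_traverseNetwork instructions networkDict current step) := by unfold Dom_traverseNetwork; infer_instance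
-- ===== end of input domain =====

-- B flattens A's recursion-restarting-the-instruction-string into one loop cycling via j % n (idiomatic; return value only — neither mutates its arguments).

-- ===== PORT A =====
-- inner 'for direction in instructions' loop: returns .inr step on early return,
-- .inl (current, step) when the pass ends.  Where Python raises (KeyError /
-- IndexError on networkDict[current][i]) the port uses defaults "" / []; those
-- inputs are excluded by Pre_.
def pvLoopA (networkDict : List (String × List String)) : List Char → String → Int → (String × Int) ⊕ Int
  | [], cur, step => .inl (cur, step)
  | ch :: rest, cur, step =>
      if PySem.Str.endswith cur "Z" then .inr step
      else
        let cur' := if ch = 'L' then ((networkDict.lookup cur).getD []).getD 0 ""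
                    else if ch = 'R' then ((networkDict.lookup cur).getD []).getD 1 ""
                    else cur
        pvLoopA networkDict rest cur' (step + 1)

-- the tail recursion 'return traverseNetwork(...)': fuel = number of restarts.
-- Python recurses unboundedly; the fuel (enough for every input in Pre_, by the
-- state-space bound used there) only makes the same computation total.
def pvOuterA (networkDict : List (String × List String)) (cs : List Char) : Nat → String → Int → Int
  | 0, _, step => step  -- fuel exhausted: Python never returns here; unreachable inside Pre_
  | f + 1, cur, step =>
      match pvLoopA networkDict cs cur step with
      | .inr s => s
      | .inl (cur', step') => pvOuterA networkDict cs f cur' step'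

def traverseNetwork (instructions : String) (networkDict : List (String × List String)) (current : String) (step : Int) : Int :=
  pvOuterA networkDict instructions.toList (2 * networkDict.length + 1) current step

-- ===== PORT B =====
-- Source B's single 'while True' loop with index j and instructions[j % n]; the same
-- fuel bound makes it total, and the same defaults stand in where Python raises.
def pvLoopB (networkDict : List (String × List String)) (cs : List Char) (n : Nat) : Nat → String → Int → Nat → Int
  | 0, _, step, _ => step  -- fuel exhausted: unreachable inside Pre_
  | f + 1, cur, step, j =>
      if PySem.Str.endswith cur "Z" then step
      else
        let direction := cs.getD (j % n) ' '
        let cur' := if direction = 'L' then ((networkDict.lookup cur).getD []).getD 0 ""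
                    else if direction = 'R' then ((networkDict.lookup cur).getD []).getD 1 ""
                    else cur
        pvLoopB networkDict cs n f cur' (step + 1) (j + 1)

def traverseNetwork_alt (instructions : String) (networkDict : List (String × List String)) (current : String) (step : Int) : Int :=
  let cs := instructions.toList
  let n := cs.length
  pvLoopB networkDict cs n (n * (2 * networkDict.length + 1) + 1) current step 0

-- ===== PRECONDITION & SPEC =====
-- one step of the walk; none exactly where Python raises (missing key / short row)
def pvStep? (networkDict : List (String × List String)) (c : String) (ch : Char) : Option String :=
  if ch = 'L' then (networkDict.lookup c).bind fun row => row[0]?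
  else if ch = 'R' then (networkDict.lookup c).bind fun row => row[1]?
  else some c

-- the walk after k steps from (c, position j); none once a lookup has failed
def pvPath? (networkDict : List (String × List String)) (cs : List Char) (n : Nat) (c : String) (j : Nat) : Nat → Option String
  | 0 => some c
  | k + 1 =>
      match pvStep? networkDict c (cs.getD (j % n) ' ') with
      | some c' => pvPath? networkDict cs n c' (j + 1) k
      | none => none

-- Pre_: instructions nonempty and the walk reaches a node ending in 'Z', with every
-- lookup succeeding on the way, within n*(2*|networkDict|+1) steps.  By pigeonhole on
-- the states (node, position mod n) — at most 2*|networkDict|+1 nodes are ever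
-- reachable — this covers EVERY input on which A returns: outside it A raises
-- (RecursionError on empty instructions or an endless walk, KeyError/IndexError on a
-- failing lookup) and B hangs or raises likewise.
def Pre_traverseNetwork (instructions : String) (networkDict : List (String × List String)) (current : String) (step : Int) : Prop :=
  instructions.toList ≠ [] ∧
  ((List.range (instructions.toList.length * (2 * networkDict.length + 1))).any fun k =>
    (pvPath? networkDict instructions.toList instructions.toList.length current 0 k).elim false
      (fun c => PySem.Str.endswith c "Z")) = true
instance (instructions : String) (networkDict : List (String × List String)) (current : String) (step : Int) : Decidable (Pre_traverseNetwork instructions networkDict current step) := by unfold Pre_traverseNetwork; infer_instance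

def pvWitness_traverseNetwork : String × (List (String × List String)) × String × Int :=
  ("LL", [("AA", ["BB", "CC"]), ("BB", ["XZ", "AA"]), ("XZ", ["AA", "AA"])], "AA", 0)

def Spec_traverseNetwork (instructions : String) (networkDict : List (String × List String)) (current : String) (step : Int) (out : Int) : Prop := out = traverseNetwork_alt instructions networkDict current step
instance (instructions : String) (networkDict : List (String × List String)) (current : String) (step : Int) (out : Int) : Decidable (Spec_traverseNetwork instructions networkDict current step out) := by unfold Spec_traverseNetwork; infer_instance

-- ===== CLAIM (what is proved, stated in full; the proofs are below) =====
def Claim_equal_traverseNetwork : Prop := ∀ (instructions : String) (networkDict : List (String × List String)) (current : String) (step : Int), Dom_traverseNetwork instructions networkDict current step → Pre_traverseNetwork instructions networkDict current step → Spec_traverseNetwork instructions networkDict current step (traverseNetwork instructions networkDict current step)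

-- ===== LEMMAS AND PROOFS =====

-- total step function (the one both ports compute)
def pvStepT (networkDict : List (String × List String)) (c : String) (ch : Char) : String :=
  if ch = 'L' then ((networkDict.lookup c).getD []).getD 0 ""
  else if ch = 'R' then ((networkDict.lookup c).getD []).getD 1 ""
  else c

-- total walk
def pvPathT (networkDict : List (String × List String)) (cs : List Char) (n : Nat) (c : String) (j : Nat) : Nat → String
  | 0 => c
  | k + 1 => pvPathT networkDict cs n (pvStepT networkDict c (cs.getD (j % n) ' ')) (j + 1) k

theorem pvStepT_of_step? (networkDict : List (String × List String)) (c : String) (ch : Char) (c' : String)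
    (h : pvStep? networkDict c ch = some c') : pvStepT networkDict c ch = c' := by
  unfold pvStep? pvStepT at *
  split_ifs at * with h1 h2
  · obtain ⟨row, hrow, hget⟩ := Option.bind_eq_some_iff.mp h
    simp [hrow, List.getD_eq_getElem?_getD, hget]
  · obtain ⟨row, hrow, hget⟩ := Option.bind_eq_some_iff.mp h
    simp [hrow, List.getD_eq_getElem?_getD, hget]
  · exact (Option.some_inj.mp h)

theorem pvPathT_of_path? (networkDict : List (String × List String)) (cs : List Char) (n : Nat) :
    ∀ (k : Nat) (c : String) (j : Nat) (c' : String),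
      pvPath? networkDict cs n c j k = some c' → pvPathT networkDict cs n c j k = c' := by
  intro k
  induction k with
  | zero => intro c j c' h; exact Option.some_inj.mp h
  | succ k ih =>
    intro c j c' h
    unfold pvPath? at h
    unfold pvPathT
    cases hs : pvStep? networkDict c (cs.getD (j % n) ' ') with
    | none => rw [hs] at h; exact absurd h (by simp)
    | some c2 =>
      rw [hs] at h
      rw [pvStepT_of_step? _ _ _ _ hs]
      exact ih c2 (j + 1) c' h

theorem pvPathT_add (networkDict : List (String × List String)) (cs : List Char) (n : Nat) :
    ∀ (a b : Nat) (c : String) (j : Nat),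
      pvPathT networkDict cs n c j (a + b) = pvPathT networkDict cs n (pvPathT networkDict cs n c j a) (j + a) b := by
  intro a
  induction a with
  | zero => intro b c j; simp [pvPathT]
  | succ a ih =>
    intro b c j
    have : a + 1 + b = (a + b) + 1 := by omega
    rw [this]
    show pvPathT networkDict cs n (pvStepT networkDict c (cs.getD (j % n) ' ')) (j + 1) (a + b) = _
    rw [ih]
    have : j + (a + 1) = (j + 1) + a := by omega
    rw [this]
    rfl

-- the walk over one full pass equals the fold over the instruction list
def pvPathL (networkDict : List (String × List String)) (cs : List Char) (c : String) (k : Nat) : String :=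
  (cs.take k).foldl (pvStepT networkDict) c

theorem pvPathT_eq_pathL (networkDict : List (String × List String)) (cs : List Char) :
    ∀ (k : Nat) (c : String) (j i : Nat), j % cs.length = i → i + k ≤ cs.length →
      pvPathT networkDict cs cs.length c j k = pvPathL networkDict (cs.drop i) c k := by
  intro k
  induction k with
  | zero => intro c j i _ _; simp [pvPathT, pvPathL]
  | succ k ih =>
    intro c j i hj hik
    have hi : i < cs.length := by omega
    have hget : cs.getD (j % cs.length) ' ' = cs[i] := by
      rw [hj]; exact List.getD_eq_getElem cs ' ' hi
    have hdrop : cs.drop i = cs[i] :: cs.drop (i + 1) := List.drop_eq_getElem_cons hi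
    have hL : pvPathL networkDict (cs.drop i) c (k + 1)
        = pvPathL networkDict (cs.drop (i + 1)) (pvStepT networkDict c cs[i]) k := by
      simp only [pvPathL]
      rw [hdrop, List.take_succ_cons, List.foldl_cons]
    rw [hL]
    show pvPathT networkDict cs cs.length (pvStepT networkDict c (cs.getD (j % cs.length) ' ')) (j + 1) k = _
    rw [hget]
    cases k with
    | zero => simp [pvPathT, pvPathL]
    | succ k =>
      apply ih
      · have hlen2 : i + 1 < cs.length := by omega
        have : (j + 1) % cs.length = (j % cs.length + 1 % cs.length) % cs.length := Nat.add_mod j 1 cs.length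
        rw [this, hj]
        have h1 : 1 % cs.length = 1 := Nat.mod_eq_of_lt (by omega)
        rw [h1]
        exact Nat.mod_eq_of_lt hlen2
      · omega

-- inner loop of A, no early return
theorem pvLoopA_full (networkDict : List (String × List String)) :
    ∀ (cs : List Char) (c : String) (s : Int),
      (∀ m < cs.length, ¬ PySem.Str.endswith (pvPathL networkDict cs c m) "Z" = true) →
      pvLoopA networkDict cs c s = .inl (cs.foldl (pvStepT networkDict) c, s + cs.length) := by
  intro cs
  induction cs with
  | nil => intro c s _; simp [pvLoopA]
  | cons ch rest ih =>
    intro c s hnoZ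
    have h0 : ¬ PySem.Str.endswith c "Z" = true := by
      have := hnoZ 0 (by simp)
      simpa [pvPathL] using this
    show (if PySem.Str.endswith c "Z" then _ else _) = _
    rw [if_neg h0]
    have hstep : (if ch = 'L' then ((networkDict.lookup c).getD []).getD 0 ""
                  else if ch = 'R' then ((networkDict.lookup c).getD []).getD 1 ""
                  else c) = pvStepT networkDict c ch := by rfl
    rw [hstep]
    rw [ih (pvStepT networkDict c ch) (s + 1) (fun m hm => by
      have := hnoZ (m + 1) (by simpa using Nat.succ_lt_succ hm)
      simpa [pvPathL, List.take_succ_cons] using this)]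
    simp
    ring

-- inner loop of A, early return at the first Z
theorem pvLoopA_ret (networkDict : List (String × List String)) :
    ∀ (k : Nat) (cs : List Char) (c : String) (s : Int), k < cs.length →
      PySem.Str.endswith (pvPathL networkDict cs c k) "Z" = true →
      (∀ m < k, ¬ PySem.Str.endswith (pvPathL networkDict cs c m) "Z" = true) →
      pvLoopA networkDict cs c s = .inr (s + k) := by
  intro k
  induction k with
  | zero =>
    intro cs c s hk hZ _
    cases cs with
    | nil => simp at hk
    | cons ch rest =>
      have : PySem.Str.endswith c "Z" = true := by simpa [pvPathL] using hZ
      show (if PySem.Str.endswith c "Z" then _ else _) = _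
      rw [if_pos this]
      simp
  | succ k ih =>
    intro cs c s hk hZ hbelow
    cases cs with
    | nil => simp at hk
    | cons ch rest =>
      have h0 : ¬ PySem.Str.endswith c "Z" = true := by
        have := hbelow 0 (by omega)
        simpa [pvPathL] using this
      show (if PySem.Str.endswith c "Z" then _ else _) = _
      rw [if_neg h0]
      have hstep : (if ch = 'L' then ((networkDict.lookup c).getD []).getD 0 ""
                    else if ch = 'R' then ((networkDict.lookup c).getD []).getD 1 ""
                    else c) = pvStepT networkDict c ch := by rfl
      rw [hstep]
      rw [ih rest (pvStepT networkDict c ch) (s + 1) (by simpa using hk)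
        (by simpa [pvPathL, List.take_succ_cons] using hZ)
        (fun m hm => by
          have := hbelow (m + 1) (by omega)
          simpa [pvPathL, List.take_succ_cons] using this)]
      congr 1
      push_cast
      ring

-- B's flat loop returns step + (first Z index)
theorem pvLoopB_ret (networkDict : List (String × List String)) (cs : List Char) :
    ∀ (k : Nat) (f : Nat) (c : String) (s : Int) (j : Nat), k < f →
      PySem.Str.endswith (pvPathT networkDict cs cs.length c j k) "Z" = true →
      (∀ m < k, ¬ PySem.Str.endswith (pvPathT networkDict cs cs.length c j m) "Z" = true) →
      pvLoopB networkDict cs cs.length f c s j = s + k := by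
  intro k
  induction k with
  | zero =>
    intro f c s j hf hZ _
    cases f with
    | zero => omega
    | succ f =>
      have : PySem.Str.endswith c "Z" = true := by simpa [pvPathT] using hZ
      show (if PySem.Str.endswith c "Z" then _ else _) = _
      rw [if_pos this]
      simp
  | succ k ih =>
    intro f c s j hf hZ hbelow
    cases f with
    | zero => omega
    | succ f =>
      have h0 : ¬ PySem.Str.endswith c "Z" = true := by
        have := hbelow 0 (by omega)
        simpa [pvPathT] using this
      show (if PySem.Str.endswith c "Z" then _ else _) = _
      rw [if_neg h0]
      show pvLoopB networkDict cs cs.length f (pvStepT networkDict c (cs.getD (j % cs.length) ' ')) (s + 1) (j + 1) = _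
      rw [ih f (pvStepT networkDict c (cs.getD (j % cs.length) ' ')) (s + 1) (j + 1) (by omega)
        (by simpa [pvPathT] using hZ)
        (fun m hm => by
          have := hbelow (m + 1) (by omega)
          simpa [pvPathT] using this)]
      push_cast
      ring

-- A's outer recursion returns step + (first Z index)
theorem pvOuterA_ret (networkDict : List (String × List String)) (cs : List Char) (hn : cs ≠ []) :
    ∀ (f : Nat) (k : Nat) (c : String) (s : Int) (j : Nat), j % cs.length = 0 → k < cs.length * f →
      PySem.Str.endswith (pvPathT networkDict cs cs.length c j k) "Z" = true →
      (∀ m < k, ¬ PySem.Str.endswith (pvPathT networkDict cs cs.length c j m) "Z" = true) →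
      pvOuterA networkDict cs f c s = s + k := by
  intro f
  induction f with
  | zero => intro k c s j _ hk; omega
  | succ f ih =>
    intro k c s j hj hk hZ hbelow
    have hlen : 0 < cs.length := List.length_pos_iff.mpr hn
    show (match pvLoopA networkDict cs c s with
      | .inr t => t
      | .inl (cur', step') => pvOuterA networkDict cs f cur' step') = s + k
    have hEq : ∀ m, m ≤ cs.length → pvPathT networkDict cs cs.length c j m = pvPathL networkDict cs c m := by
      intro m hm
      have h := pvPathT_eq_pathL networkDict cs m c j 0 hj (by omega)
      simpa using h
    by_cases hcase : k < cs.length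
    · rw [pvLoopA_ret networkDict k cs c s hcase
        (by rw [← hEq k (by omega)]; exact hZ)
        (fun m hm => by rw [← hEq m (by omega)]; exact hbelow m hm)]
    · have hall : ∀ m < cs.length, ¬ PySem.Str.endswith (pvPathL networkDict cs c m) "Z" = true := by
        intro m hm
        rw [← hEq m (by omega)]
        exact hbelow m (by omega)
      rw [pvLoopA_full networkDict cs c s (by simpa using hall)]
      show pvOuterA networkDict cs f (cs.foldl (pvStepT networkDict) c) (s + ↑cs.length) = s + ↑k
      have hfold : cs.foldl (pvStepT networkDict) c = pvPathT networkDict cs cs.length c j cs.length := by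
        rw [hEq cs.length (le_refl _)]
        simp [pvPathL]
      rw [hfold]
      have hsplit : ∀ m : Nat, pvPathT networkDict cs cs.length (pvPathT networkDict cs cs.length c j cs.length) (j + cs.length) m = pvPathT networkDict cs cs.length c j (cs.length + m) := by
        intro m
        rw [pvPathT_add networkDict cs cs.length cs.length m c j]
      rw [ih (k - cs.length) (pvPathT networkDict cs cs.length c j cs.length) (s + cs.length) (j + cs.length)
        (by rw [Nat.add_mod_right]; exact hj)
        (by rw [Nat.mul_succ] at hk; omega)
        (by rw [hsplit]; have : cs.length + (k - cs.length) = k := by omega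
            rw [this]; exact hZ)
        (fun m hm => by
          rw [hsplit]
          exact hbelow (cs.length + m) (by omega))]
      omega

-- ===== VERDICT (by name: the statement is the Claim_ definition above) =====
theorem traverseNetwork_spec : Claim_equal_traverseNetwork := by
  intro instructions networkDict current step _ hpre
  obtain ⟨hne, hany⟩ := hpre
  unfold Spec_traverseNetwork traverseNetwork traverseNetwork_alt
  rw [List.any_eq_true] at hany
  obtain ⟨k, hkmem, hkZ⟩ := hany
  rw [List.mem_range] at hkmem
  obtain ⟨c', hc', hZ'⟩ : ∃ c', pvPath? networkDict instructions.toList instructions.toList.length current 0 k = some c' ∧ PySem.Str.endswith c' "Z" = true := by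
    cases h : pvPath? networkDict instructions.toList instructions.toList.length current 0 k with
    | none => rw [h] at hkZ; simp [Option.elim] at hkZ
    | some c' => rw [h] at hkZ; exact ⟨c', rfl, by simpa [Option.elim] using hkZ⟩
  have hT : pvPathT networkDict instructions.toList instructions.toList.length current 0 k = c' :=
    pvPathT_of_path? networkDict instructions.toList instructions.toList.length k current 0 c' hc'
  have hPk : PySem.Str.endswith (pvPathT networkDict instructions.toList instructions.toList.length current 0 k) "Z" = true := by
    rw [hT]; exact hZ'
  have hex : ∃ m, PySem.Str.endswith (pvPathT networkDict instructions.toList instructions.toList.length current 0 m) "Z" = true := ⟨k, hPk⟩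
  let k0 := Nat.find hex
  have hk0Z := Nat.find_spec hex
  have hk0le : k0 ≤ k := Nat.find_le hPk
  have hk0min : ∀ m < k0, ¬ PySem.Str.endswith (pvPathT networkDict instructions.toList instructions.toList.length current 0 m) "Z" = true :=
    fun m hm => Nat.find_min hex hm
  rw [pvOuterA_ret networkDict instructions.toList hne (2 * networkDict.length + 1) k0 current step 0
      (Nat.zero_mod _) (by omega) hk0Z hk0min,
    pvLoopB_ret networkDict instructions.toList k0 (instructions.toList.length * (2 * networkDict.length + 1) + 1) current step 0
      (by omega) hk0Z hk0min]
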